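-- pv_equiv track=rewrite | github.com/stojan97/advent-of-code-2021 | day-22/solution_2.py | part2
-- ===== SOURCE A (Python) =====
-- def get_cubes(index, coordinate):
--     return coordinate[index + 1] - coordinate[index]
--
-- def part2(instructions):
--     xs = set()
--     ys = set()
--     zs = set()
--
--     for _, (x1, x2, y1, y2, z1, z2) in instructions:
--         xs.update({x1, x2 + 1})
--         ys.update({y1, y2 + 1})
--         zs.update({z1, z2 + 1})
--
--     xl = sorted(list(xs))
--     yl = sorted(list(ys))
--     zl = sorted(list(zs))
--
--     # compressed turned_on
--     turned_on = set()
--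
--     for idx, instruction in enumerate(instructions):
--         state, (x1, x2, y1, y2, z1, z2) = instruction
--         x1_idx, x2_idx = xl.index(x1), xl.index(x2 + 1)
--         y1_idx, y2_idx = yl.index(y1), yl.index(y2 + 1)
--         z1_idx, z2_idx = zl.index(z1), zl.index(z2 + 1)
--
--         for x in range(x1_idx, x2_idx):
--             for y in range(y1_idx, y2_idx):
--                 for z in range(z1_idx, z2_idx):
--                     if state:
--                         turned_on.add((x, y, z))
--                     else:
--                         turned_on.discard((x, y, z))
--
--     return sum(get_cubes(x, xl) * get_cubes(y, yl) * get_cubes(z, zl) for x, y, z in turned_on)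
-- ===== SOURCE B (Python) =====
-- def part2(instructions):
--     # Coordinate-compressed grid; each cell's final state is decided by replaying
--     # the instructions per cell (last covering instruction wins) - no mutable set.
--     xl = sorted({c for _, (x1, x2, _, _, _, _) in instructions for c in (x1, x2 + 1)})
--     yl = sorted({c for _, (_, _, y1, y2, _, _) in instructions for c in (y1, y2 + 1)})
--     zl = sorted({c for _, (_, _, _, _, z1, z2) in instructions for c in (z1, z2 + 1)})
--     total = 0
--     for i in range(len(xl) - 1):
--         for j in range(len(yl) - 1):
--             for k in range(len(zl) - 1):
--                 on = False
--                 for state, (x1, x2, y1, y2, z1, z2) in instructions: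
--                     if x1 <= xl[i] <= x2 and y1 <= yl[j] <= y2 and z1 <= zl[k] <= z2:
--                         on = state
--                 if on:
--                     total += (xl[i + 1] - xl[i]) * (yl[j + 1] - yl[j]) * (zl[k + 1] - zl[k])
--     return total
-- ===== Notes on version B (the rewrite author's own statement) =====
-- stated objective: alternative
-- what changed: Replaces A's mutable compressed set (per-instruction add/discard over every covered cell) by a per-cell replay: for each compressed grid cell the instructions are scanned once and the last covering instruction's state decides the cell, summing volumes directly with no set and no list.index.
import Mathlib
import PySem

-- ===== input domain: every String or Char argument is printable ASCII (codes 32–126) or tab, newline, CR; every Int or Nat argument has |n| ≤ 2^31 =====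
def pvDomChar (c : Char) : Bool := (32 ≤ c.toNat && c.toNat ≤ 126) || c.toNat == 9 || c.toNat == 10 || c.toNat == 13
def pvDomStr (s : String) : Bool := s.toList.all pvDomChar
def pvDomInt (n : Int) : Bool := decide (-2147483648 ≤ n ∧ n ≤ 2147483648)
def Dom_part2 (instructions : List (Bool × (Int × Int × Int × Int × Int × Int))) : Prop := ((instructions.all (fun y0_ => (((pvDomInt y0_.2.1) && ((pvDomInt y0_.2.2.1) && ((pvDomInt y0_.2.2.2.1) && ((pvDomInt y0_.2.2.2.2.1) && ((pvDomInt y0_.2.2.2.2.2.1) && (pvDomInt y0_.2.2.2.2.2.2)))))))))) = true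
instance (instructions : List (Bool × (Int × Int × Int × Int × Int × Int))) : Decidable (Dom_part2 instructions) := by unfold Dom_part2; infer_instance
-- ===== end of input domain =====

-- B replaces A's mutated compressed set (per-instruction add/discard of every covered cell, with list.index lookups)
-- by a per-cell replay of the instructions (last covering instruction wins), summing volumes directly (objective: alternative).

-- ===== PORT A =====
-- get_cubes: coordinate[index + 1] - coordinate[index]; wherever A calls it both indices are in range,
-- so pyGetD's default is unreachable (exact there).
def getCubes (index : Int) (coordinate : List Int) : Int :=
  PySem.List.pyGetD coordinate (index + 1) 0 - PySem.List.pyGetD coordinate index 0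

-- xl.index(v) as a Python int; wherever A calls it v is an element of l (it was inserted into the set),
-- so index? is some and the getD default is unreachable (exact there).
def idxA (l : List Int) (v : Int) : Int :=
  (((PySem.List.index? l v).getD 0 : Nat) : Int)

-- the body of A's second loop (enumerate's idx is unused in the Python and dropped):
-- compute the six compressed indices, then the triple nested range loop adding/discarding cells.
def stepA (xl yl zl : List Int) (ton : PySem.Set (Int × Int × Int))
    (inst : Bool × (Int × Int × Int × Int × Int × Int)) : PySem.Set (Int × Int × Int) :=
  match inst with
  | (state, (x1, x2, y1, y2, z1, z2)) =>
    (PySem.List.pyRange (idxA xl x1) (idxA xl (x2 + 1)) 1).foldl (fun ton x =>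
      (PySem.List.pyRange (idxA yl y1) (idxA yl (y2 + 1)) 1).foldl (fun ton y =>
        (PySem.List.pyRange (idxA zl z1) (idxA zl (z2 + 1)) 1).foldl (fun ton z =>
          if state then PySem.Set.add ton (x, y, z) else PySem.Set.discard ton (x, y, z)) ton) ton) ton

def part2 (instructions : List (Bool × (Int × Int × Int × Int × Int × Int))) : Int :=
  -- xs.update({x1, x2 + 1}) etc.: one loop over instructions maintaining the three sets
  let sets := instructions.foldl
    (fun (acc : PySem.Set Int × PySem.Set Int × PySem.Set Int) inst =>
      (PySem.Set.update acc.1 [inst.2.1, inst.2.2.1 + 1],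
       PySem.Set.update acc.2.1 [inst.2.2.2.1, inst.2.2.2.2.1 + 1],
       PySem.Set.update acc.2.2 [inst.2.2.2.2.2.1, inst.2.2.2.2.2.2 + 1]))
    (PySem.Set.empty, PySem.Set.empty, PySem.Set.empty)
  let xl := PySem.List.sorted sets.1 (fun v => v) false
  let yl := PySem.List.sorted sets.2.1 (fun v => v) false
  let zl := PySem.List.sorted sets.2.2 (fun v => v) false
  let turnedOn := instructions.foldl (stepA xl yl zl) PySem.Set.empty
  -- sum over the set: order-independent (sum of Ints)
  (turnedOn.map (fun c => getCubes c.1 xl * getCubes c.2.1 yl * getCubes c.2.2 zl)).sum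

-- ===== PORT B =====
-- sorted({c for _, box in instructions for c in (lo(box), hi(box) + 1)}) for one axis
def axisB (instructions : List (Bool × (Int × Int × Int × Int × Int × Int)))
    (lo hi : Int × Int × Int × Int × Int × Int → Int) : List Int :=
  PySem.List.sorted
    (PySem.Set.ofList (instructions.flatMap (fun t => [lo t.2, hi t.2 + 1]))) (fun v => v) false

-- the per-cell replay: on = state of the last instruction covering the cell's representative point
def cellOnB (instructions : List (Bool × (Int × Int × Int × Int × Int × Int)))
    (vx vy vz : Int) : Bool :=
  instructions.foldl (fun on inst =>
    match inst with
    | (state, (x1, x2, y1, y2, z1, z2)) =>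
      if x1 ≤ vx ∧ vx ≤ x2 ∧ y1 ≤ vy ∧ vy ≤ y2 ∧ z1 ≤ vz ∧ vz ≤ z2 then state else on) false

def part2_alt (instructions : List (Bool × (Int × Int × Int × Int × Int × Int))) : Int :=
  let xl := axisB instructions (fun c => c.1) (fun c => c.2.1)
  let yl := axisB instructions (fun c => c.2.2.1) (fun c => c.2.2.2.1)
  let zl := axisB instructions (fun c => c.2.2.2.2.1) (fun c => c.2.2.2.2.2)
  (PySem.List.pyRange 0 ((xl.length : Int) - 1) 1).foldl (fun tot i =>
    (PySem.List.pyRange 0 ((yl.length : Int) - 1) 1).foldl (fun tot j =>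
      (PySem.List.pyRange 0 ((zl.length : Int) - 1) 1).foldl (fun tot k =>
        if cellOnB instructions (PySem.List.pyGetD xl i 0) (PySem.List.pyGetD yl j 0)
            (PySem.List.pyGetD zl k 0) then
          tot + (PySem.List.pyGetD xl (i + 1) 0 - PySem.List.pyGetD xl i 0) *
                (PySem.List.pyGetD yl (j + 1) 0 - PySem.List.pyGetD yl j 0) *
                (PySem.List.pyGetD zl (k + 1) 0 - PySem.List.pyGetD zl k 0)
        else tot) tot) tot) 0

-- ===== PRECONDITION & SPEC =====
def Spec_part2 (instructions : List (Bool × (Int × Int × Int × Int × Int × Int))) (out : Int) : Prop := out = part2_alt instructions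
instance (instructions : List (Bool × (Int × Int × Int × Int × Int × Int))) (out : Int) : Decidable (Spec_part2 instructions out) := by unfold Spec_part2; infer_instance

-- ===== CLAIM (what is proved, stated in full; the proofs are below) =====
def Claim_equal_part2 : Prop := ∀ (instructions : List (Bool × (Int × Int × Int × Int × Int × Int))), Dom_part2 instructions → Spec_part2 instructions (part2 instructions)

-- ===== LEMMAS AND PROOFS =====
abbrev PVInst : Type := Bool × (Int × Int × Int × Int × Int × Int)
abbrev PVCell : Type := Int × Int × Int

theorem pv_nested2 {α β S : Type} (Ry : List α) (Rz : List β) (f : S → α × β → S) (s : S) :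
    Ry.foldl (fun s y => Rz.foldl (fun s z => f s (y, z)) s) s = (Ry ×ˢ Rz).foldl f s := by
  rw [show Ry ×ˢ Rz = Ry.flatMap (fun y => Rz.map (y, ·)) from rfl, List.foldl_flatMap]
  apply PySem.List.foldl_congr_mem
  intro acc y _
  rw [List.foldl_map]

theorem pv_nested3 {α β γ S : Type} (Rx : List α) (Ry : List β) (Rz : List γ)
    (f : S → α × β × γ → S) (s : S) :
    Rx.foldl (fun s x => Ry.foldl (fun s y => Rz.foldl (fun s z => f s (x, y, z)) s) s) s
      = (Rx ×ˢ (Ry ×ˢ Rz)).foldl f s := by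
  rw [show Rx ×ˢ (Ry ×ˢ Rz) = Rx.flatMap (fun x => (Ry ×ˢ Rz).map (x, ·)) from rfl,
    List.foldl_flatMap]
  apply PySem.List.foldl_congr_mem
  intro acc x _
  rw [List.foldl_map, ← pv_nested2]

theorem pv_mem_foldl_discard {α : Type} [BEq α] [LawfulBEq α] (L : List α) (s : PySem.Set α)
    (c : α) : c ∈ L.foldl PySem.Set.discard s ↔ c ∈ s ∧ c ∉ L := by
  induction L generalizing s with
  | nil => simp
  | cons h t ih => simp [ih, PySem.Set.mem_discard]; tauto

theorem pv_nodup_foldl_discard {α : Type} [BEq α] [LawfulBEq α] (L : List α) (s : PySem.Set α)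
    (h : s.Nodup) : (L.foldl PySem.Set.discard s).Nodup := by
  induction L generalizing s with
  | nil => exact h
  | cons x t ih => exact ih _ (PySem.Set.nodup_discard _ _ h)

theorem pv_mem_stepA (xl yl zl : List Int) (s : PySem.Set PVCell) (st : Bool)
    (x1 x2 y1 y2 z1 z2 : Int) (c : PVCell) :
    c ∈ stepA xl yl zl s (st, (x1, x2, y1, y2, z1, z2)) ↔
      (if idxA xl x1 ≤ c.1 ∧ c.1 < idxA xl (x2 + 1) ∧ idxA yl y1 ≤ c.2.1 ∧ c.2.1 < idxA yl (y2 + 1)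
          ∧ idxA zl z1 ≤ c.2.2 ∧ c.2.2 < idxA zl (z2 + 1)
        then st = true else c ∈ s) := by
  have hmem : ∀ m : PVCell, m ∈ (PySem.List.pyRange (idxA xl x1) (idxA xl (x2 + 1)) 1 ×ˢ
      (PySem.List.pyRange (idxA yl y1) (idxA yl (y2 + 1)) 1 ×ˢ
       PySem.List.pyRange (idxA zl z1) (idxA zl (z2 + 1)) 1)) ↔
      (idxA xl x1 ≤ m.1 ∧ m.1 < idxA xl (x2 + 1)) ∧
      (idxA yl y1 ≤ m.2.1 ∧ m.2.1 < idxA yl (y2 + 1)) ∧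
      (idxA zl z1 ≤ m.2.2 ∧ m.2.2 < idxA zl (z2 + 1)) := by
    intro m
    rw [List.mem_product, List.mem_product, PySem.List.mem_pyRange_one,
      PySem.List.mem_pyRange_one, PySem.List.mem_pyRange_one]
  unfold stepA
  cases st with
  | true =>
    simp only [if_pos trivial]
    rw [pv_nested3 (f := fun s c => PySem.Set.add s c),
      show ((PySem.List.pyRange (idxA xl x1) (idxA xl (x2+1)) 1 ×ˢ
        (PySem.List.pyRange (idxA yl y1) (idxA yl (y2+1)) 1 ×ˢ
         PySem.List.pyRange (idxA zl z1) (idxA zl (z2+1)) 1)).foldl PySem.Set.add s)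
        = PySem.Set.update s _ from rfl, PySem.Set.mem_update, hmem c]
    by_cases hb : idxA xl x1 ≤ c.1 ∧ c.1 < idxA xl (x2 + 1) ∧ idxA yl y1 ≤ c.2.1 ∧
        c.2.1 < idxA yl (y2 + 1) ∧ idxA zl z1 ≤ c.2.2 ∧ c.2.2 < idxA zl (z2 + 1)
    · rw [if_pos hb]; simp; tauto
    · rw [if_neg hb]
      constructor
      · rintro (h | h)
        · exact h
        · exact absurd (by tauto : idxA xl x1 ≤ c.1 ∧ c.1 < idxA xl (x2 + 1) ∧
            idxA yl y1 ≤ c.2.1 ∧ c.2.1 < idxA yl (y2 + 1) ∧ idxA zl z1 ≤ c.2.2 ∧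
            c.2.2 < idxA zl (z2 + 1)) hb
      · exact Or.inl
  | false =>
    simp only [Bool.false_eq_true, if_false]
    rw [pv_nested3 (f := fun s c => PySem.Set.discard s c), pv_mem_foldl_discard, hmem c]
    by_cases hb : idxA xl x1 ≤ c.1 ∧ c.1 < idxA xl (x2 + 1) ∧ idxA yl y1 ≤ c.2.1 ∧
        c.2.1 < idxA yl (y2 + 1) ∧ idxA zl z1 ≤ c.2.2 ∧ c.2.2 < idxA zl (z2 + 1)
    · rw [if_pos hb]; simp; tauto
    · rw [if_neg hb]
      constructor
      · exact fun h => h.1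
      · intro h
        exact ⟨h, fun hbox => hb (by tauto)⟩

theorem pv_idxA_nonneg (l : List Int) (v : Int) : 0 ≤ idxA l v := Int.natCast_nonneg _

theorem pv_idxA_lt_length (l : List Int) (v : Int) (hv : v ∈ l) :
    idxA l v < (l.length : Int) := by
  obtain ⟨k, hk⟩ : ∃ k, PySem.List.index? l v = some k := by
    rw [PySem.List.index?_eq_idxOf?]
    exact Option.isSome_iff_exists.mp (List.isSome_idxOf?.mpr hv)
  obtain ⟨hklen, -, -⟩ := PySem.List.getElem_of_index?_eq_some hk
  simp only [idxA, hk, Option.getD_some]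
  exact_mod_cast hklen

theorem pv_idx_le_iff (l : List Int) (hs : l.Pairwise (· < ·)) (v : Int) (hv : v ∈ l)
    (i : Int) (h0 : 0 ≤ i) (hi : i < (l.length : Int)) :
    idxA l v ≤ i ↔ v ≤ PySem.List.pyGetD l i 0 := by
  obtain ⟨k, hk⟩ : ∃ k, PySem.List.index? l v = some k := by
    rw [PySem.List.index?_eq_idxOf?]
    exact Option.isSome_iff_exists.mp (List.isSome_idxOf?.mpr hv)
  obtain ⟨hklen, hxk, -⟩ := PySem.List.getElem_of_index?_eq_some hk
  have hmono := List.pairwise_iff_getElem.mp hs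
  have hilen : i.toNat < l.length := by omega
  rw [PySem.List.pyGetD_eq_getElem (h0 := h0) (h1 := hi)]
  simp only [idxA, hk, Option.getD_some]
  constructor
  · intro h
    rcases Nat.lt_or_ge k i.toNat with hlt | hge
    · have := hmono k i.toNat hklen hilen hlt
      omega
    · have hke : k = i.toNat := by omega
      subst hke
      omega
  · intro h
    by_contra hlt
    have h2 : i.toNat < k := by omega
    have := hmono i.toNat k hilen hklen h2
    omega

theorem pv_idx_box_iff (l : List Int) (hs : l.Pairwise (· < ·)) (a b : Int)
    (ha : a ∈ l) (hb : b + 1 ∈ l) (i : Int) (h0 : 0 ≤ i) (hi : i < (l.length : Int) - 1) :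
    (idxA l a ≤ i ∧ i < idxA l (b + 1)) ↔
      (a ≤ PySem.List.pyGetD l i 0 ∧ PySem.List.pyGetD l i 0 ≤ b) := by
  have h1 := pv_idx_le_iff l hs a ha i h0 (by omega)
  have h2 := pv_idx_le_iff l hs (b + 1) hb i h0 (by omega)
  constructor
  · rintro ⟨hl, hr⟩
    refine ⟨h1.mp hl, ?_⟩
    by_contra hc
    have : idxA l (b + 1) ≤ i := h2.mpr (by omega)
    omega
  · rintro ⟨hl, hr⟩
    refine ⟨h1.mpr hl, ?_⟩
    by_contra hc
    have : b + 1 ≤ PySem.List.pyGetD l i 0 := h2.mp (by omega)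
    omega

def PVMemsOK (xl yl zl : List Int) (t : PVInst) : Prop :=
  t.2.1 ∈ xl ∧ t.2.2.1 + 1 ∈ xl ∧ t.2.2.2.1 ∈ yl ∧ t.2.2.2.2.1 + 1 ∈ yl ∧
  t.2.2.2.2.2.1 ∈ zl ∧ t.2.2.2.2.2.2 + 1 ∈ zl

def PVInGrid (xl yl zl : List Int) (c : PVCell) : Prop :=
  0 ≤ c.1 ∧ c.1 < (xl.length : Int) - 1 ∧ 0 ≤ c.2.1 ∧ c.2.1 < (yl.length : Int) - 1 ∧
  0 ≤ c.2.2 ∧ c.2.2 < (zl.length : Int) - 1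

def pvStepB (vx vy vz : Int) (on : Bool) (t : PVInst) : Bool :=
  if t.2.1 ≤ vx ∧ vx ≤ t.2.2.1 ∧ t.2.2.2.1 ≤ vy ∧ vy ≤ t.2.2.2.2.1 ∧
      t.2.2.2.2.2.1 ≤ vz ∧ vz ≤ t.2.2.2.2.2.2 then t.1 else on

theorem pv_cellOnB_eq (ins : List PVInst) (vx vy vz : Int) :
    cellOnB ins vx vy vz = ins.foldl (pvStepB vx vy vz) false := by
  unfold cellOnB
  apply PySem.List.foldl_congr_mem
  intro acc t _
  rcases t with ⟨st, x1, x2, y1, y2, z1, z2⟩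
  rfl

set_option maxHeartbeats 1000000 in
theorem pv_foldl_stepA_char (xl yl zl : List Int)
    (hx : xl.Pairwise (· < ·)) (hy : yl.Pairwise (· < ·)) (hz : zl.Pairwise (· < ·))
    (L : List PVInst) (hm : ∀ t ∈ L, PVMemsOK xl yl zl t) (i j k : Int)
    (hi : 0 ≤ i ∧ i < (xl.length : Int) - 1) (hj : 0 ≤ j ∧ j < (yl.length : Int) - 1)
    (hk : 0 ≤ k ∧ k < (zl.length : Int) - 1)
    (s : PySem.Set PVCell) (b : Bool) (hs : (i, j, k) ∈ s ↔ b = true) :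
    ((i, j, k) ∈ L.foldl (stepA xl yl zl) s ↔
      L.foldl (pvStepB (PySem.List.pyGetD xl i 0) (PySem.List.pyGetD yl j 0)
        (PySem.List.pyGetD zl k 0)) b = true) := by
  induction L generalizing s b with
  | nil => simpa using hs
  | cons t rest ih =>
    obtain ⟨st, x1, x2, y1, y2, z1, z2⟩ := t
    have hmt := hm _ (List.mem_cons_self ..)
    simp only [PVMemsOK] at hmt
    obtain ⟨hmx1, hmx2, hmy1, hmy2, hmz1, hmz2⟩ := hmt
    have hbx := pv_idx_box_iff xl hx x1 x2 hmx1 hmx2 i hi.1 hi.2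
    have hby := pv_idx_box_iff yl hy y1 y2 hmy1 hmy2 j hj.1 hj.2
    have hbz := pv_idx_box_iff zl hz z1 z2 hmz1 hmz2 k hk.1 hk.2
    have hs' : ((i, j, k) ∈ stepA xl yl zl s (st, (x1, x2, y1, y2, z1, z2)) ↔
        pvStepB (PySem.List.pyGetD xl i 0) (PySem.List.pyGetD yl j 0)
          (PySem.List.pyGetD zl k 0) b (st, (x1, x2, y1, y2, z1, z2)) = true) := by
      rw [pv_mem_stepA]
      simp only [pvStepB]
      by_cases hcov : x1 ≤ PySem.List.pyGetD xl i 0 ∧ PySem.List.pyGetD xl i 0 ≤ x2 ∧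
          y1 ≤ PySem.List.pyGetD yl j 0 ∧ PySem.List.pyGetD yl j 0 ≤ y2 ∧
          z1 ≤ PySem.List.pyGetD zl k 0 ∧ PySem.List.pyGetD zl k 0 ≤ z2
      · obtain ⟨c1, c2, c3, c4, c5, c6⟩ := hcov
        have a1 := hbx.mpr ⟨c1, c2⟩
        have a2 := hby.mpr ⟨c3, c4⟩
        have a3 := hbz.mpr ⟨c5, c6⟩
        rw [if_pos ⟨a1.1, a1.2, a2.1, a2.2, a3.1, a3.2⟩, if_pos ⟨c1, c2, c3, c4, c5, c6⟩]
      · rw [if_neg (fun hidx => hcov ⟨(hbx.mp ⟨hidx.1, hidx.2.1⟩).1, (hbx.mp ⟨hidx.1, hidx.2.1⟩).2,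
          (hby.mp ⟨hidx.2.2.1, hidx.2.2.2.1⟩).1, (hby.mp ⟨hidx.2.2.1, hidx.2.2.2.1⟩).2,
          (hbz.mp ⟨hidx.2.2.2.2.1, hidx.2.2.2.2.2⟩).1,
          (hbz.mp ⟨hidx.2.2.2.2.1, hidx.2.2.2.2.2⟩).2⟩), if_neg hcov]
        exact hs
    simp only [List.foldl_cons]
    exact ih (fun u hu => hm u (List.mem_cons_of_mem _ hu)) _ _ hs'

theorem pv_nodup_foldl_stepA (xl yl zl : List Int) (L : List PVInst) (s : PySem.Set PVCell)
    (h : s.Nodup) : (L.foldl (stepA xl yl zl) s).Nodup := by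
  induction L generalizing s with
  | nil => exact h
  | cons t rest ih =>
    apply ih
    obtain ⟨st, x1, x2, y1, y2, z1, z2⟩ := t
    unfold stepA
    cases st with
    | true =>
      simp only [if_pos trivial]
      rw [pv_nested3 (f := fun s c => PySem.Set.add s c)]
      exact PySem.Set.nodup_update _ _ h
    | false =>
      simp only [Bool.false_eq_true, if_false]
      rw [pv_nested3 (f := fun s c => PySem.Set.discard s c)]
      exact pv_nodup_foldl_discard _ _ h

theorem pv_grid_foldl_stepA (xl yl zl : List Int) (L : List PVInst)
    (hm : ∀ t ∈ L, PVMemsOK xl yl zl t) (s : PySem.Set PVCell)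
    (hs : ∀ c ∈ s, PVInGrid xl yl zl c) :
    ∀ c ∈ L.foldl (stepA xl yl zl) s, PVInGrid xl yl zl c := by
  induction L generalizing s with
  | nil => exact hs
  | cons t rest ih =>
    apply ih (fun u hu => hm u (List.mem_cons_of_mem _ hu))
    intro c hc
    obtain ⟨st, x1, x2, y1, y2, z1, z2⟩ := t
    have hmt := hm _ (List.mem_cons_self ..)
    simp only [PVMemsOK] at hmt
    obtain ⟨hmx1, hmx2, hmy1, hmy2, hmz1, hmz2⟩ := hmt
    rw [pv_mem_stepA] at hc
    split at hc
    · rename_i hbox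
      have e1 := pv_idxA_nonneg xl x1
      have e2 := pv_idxA_lt_length xl _ hmx2
      have e3 := pv_idxA_nonneg yl y1
      have e4 := pv_idxA_lt_length yl _ hmy2
      have e5 := pv_idxA_nonneg zl z1
      have e6 := pv_idxA_lt_length zl _ hmz2
      exact ⟨by omega, by omega, by omega, by omega, by omega, by omega⟩
    · exact hs c hc

-- the three independent accumulators of A's first loop, separated
theorem pv_sets_split (ins : List PVInst) (a b c : PySem.Set Int) :
    ins.foldl
      (fun (acc : PySem.Set Int × PySem.Set Int × PySem.Set Int) inst =>
        (PySem.Set.update acc.1 [inst.2.1, inst.2.2.1 + 1],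
         PySem.Set.update acc.2.1 [inst.2.2.2.1, inst.2.2.2.2.1 + 1],
         PySem.Set.update acc.2.2 [inst.2.2.2.2.2.1, inst.2.2.2.2.2.2 + 1])) (a, b, c)
    = (ins.foldl (fun s t => PySem.Set.update s [t.2.1, t.2.2.1 + 1]) a,
       ins.foldl (fun s t => PySem.Set.update s [t.2.2.2.1, t.2.2.2.2.1 + 1]) b,
       ins.foldl (fun s t => PySem.Set.update s [t.2.2.2.2.2.1, t.2.2.2.2.2.2 + 1]) c) := by
  induction ins generalizing a b c with
  | nil => rfl
  | cons t rest ih => simp only [List.foldl_cons, ih]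

theorem pv_mem_foldl_upd (lo hi : Int × Int × Int × Int × Int × Int → Int) (L : List PVInst)
    (s : PySem.Set Int) (v : Int) :
    v ∈ L.foldl (fun s t => PySem.Set.update s [lo t.2, hi t.2 + 1]) s ↔
      v ∈ s ∨ ∃ t ∈ L, v = lo t.2 ∨ v = hi t.2 + 1 := by
  induction L generalizing s with
  | nil => simp
  | cons t rest ih =>
    simp only [List.foldl_cons, ih, PySem.Set.mem_update, List.mem_cons,
      List.not_mem_nil, or_false]
    constructor
    · rintro ((h | h) | ⟨u, hu, h⟩)
      · exact Or.inl h
      · exact Or.inr ⟨t, Or.inl rfl, h⟩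
      · exact Or.inr ⟨u, Or.inr hu, h⟩
    · rintro (h | ⟨u, (rfl | hu), h⟩)
      · exact Or.inl (Or.inl h)
      · exact Or.inl (Or.inr h)
      · exact Or.inr ⟨u, hu, h⟩

theorem pv_nodup_foldl_upd (lo hi : Int × Int × Int × Int × Int × Int → Int) (L : List PVInst)
    (s : PySem.Set Int) (h : s.Nodup) :
    (L.foldl (fun s t => PySem.Set.update s [lo t.2, hi t.2 + 1]) s).Nodup := by
  induction L generalizing s with
  | nil => exact h
  | cons t rest ih => exact ih _ (PySem.Set.nodup_update _ _ h)

theorem pv_mem_axisB (ins : List PVInst) (lo hi : Int × Int × Int × Int × Int × Int → Int)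
    (v : Int) : v ∈ axisB ins lo hi ↔ ∃ t ∈ ins, v = lo t.2 ∨ v = hi t.2 + 1 := by
  unfold axisB
  rw [PySem.List.mem_sorted, PySem.Set.mem_ofList, List.mem_flatMap]
  constructor
  · rintro ⟨t, ht, h⟩
    simp only [List.mem_cons, List.not_mem_nil, or_false] at h
    exact ⟨t, ht, h⟩
  · rintro ⟨t, ht, h⟩
    exact ⟨t, ht, by simpa using h⟩

theorem pv_axisB_pairwise (ins : List PVInst) (lo hi : Int × Int × Int × Int × Int × Int → Int) :
    (axisB ins lo hi).Pairwise (· < ·) := PySem.List.sorted_ofList_pairwise_lt _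

theorem pv_axis_eq (ins : List PVInst) (lo hi : Int × Int × Int × Int × Int × Int → Int) :
    PySem.List.sorted (ins.foldl (fun s t => PySem.Set.update s [lo t.2, hi t.2 + 1])
      PySem.Set.empty) (fun v => v) false = axisB ins lo hi := by
  unfold axisB
  apply PySem.List.sorted_eq_sorted_of_perm _ _ _ (fun a b h => h)
  apply (List.perm_ext_iff_of_nodup
    (pv_nodup_foldl_upd lo hi ins PySem.Set.empty (List.nodup_nil))
    (PySem.Set.nodup_ofList _)).2
  intro v
  rw [pv_mem_foldl_upd, PySem.Set.mem_ofList, List.mem_flatMap]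
  constructor
  · rintro (h | ⟨t, ht, h⟩)
    · cases h
    · exact ⟨t, ht, by simpa using h⟩
  · rintro ⟨t, ht, h⟩
    simp only [List.mem_cons, List.not_mem_nil, or_false] at h
    exact Or.inr ⟨t, ht, h⟩

-- sum bookkeeping
theorem pv_sum_map_ite_filter {β : Type} (G : List β) (p : β → Bool) (f : β → Int) :
    (G.map (fun c => if p c then f c else 0)).sum = ((G.filter p).map f).sum := by
  induction G with
  | nil => rfl
  | cons h t ih => by_cases hp : p h <;> simp [hp, ih]

theorem pv_sum_prod2 {α β : Type} (Ry : List α) (Rz : List β) (f : α × β → Int) :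
    ((Ry ×ˢ Rz).map f).sum = (Ry.map (fun j => (Rz.map (fun k => f (j, k))).sum)).sum := by
  induction Ry with
  | nil => rfl
  | cons y t ih =>
    rw [show (y :: t) ×ˢ Rz = Rz.map (y, ·) ++ t ×ˢ Rz from rfl]
    simp [ih, List.map_map, Function.comp_def]

theorem pv_sum_prod3 {α β γ : Type} (Rx : List α) (Ry : List β) (Rz : List γ)
    (f : α × β × γ → Int) :
    ((Rx ×ˢ (Ry ×ˢ Rz)).map f).sum
      = (Rx.map (fun i => (Ry.map (fun j => (Rz.map (fun k => f (i, j, k))).sum)).sum)).sum := by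
  rw [pv_sum_prod2]
  congr 1
  apply List.map_congr_left
  intro i _
  rw [pv_sum_prod2]

theorem pv_foldl_if_add {α : Type} (L : List α) (p : α → Bool) (v : α → Int) (a : Int) :
    L.foldl (fun tot x => if p x then tot + v x else tot) a
      = a + (L.map (fun x => if p x then v x else 0)).sum := by
  rw [show (fun (tot : Int) x => if p x then tot + v x else tot)
      = fun tot x => tot + (if p x then v x else 0) by funext tot x; split <;> simp]
  rw [PySem.List.foldl_add]

abbrev pvVol (xl yl zl : List Int) (c : PVCell) : Int :=
  getCubes c.1 xl * getCubes c.2.1 yl * getCubes c.2.2 zl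

abbrev pvF (ins : List PVInst) (xl yl zl : List Int) (c : PVCell) : Int :=
  if cellOnB ins (PySem.List.pyGetD xl c.1 0) (PySem.List.pyGetD yl c.2.1 0)
      (PySem.List.pyGetD zl c.2.2 0) then pvVol xl yl zl c else 0

abbrev pvRx (xl : List Int) : List Int := PySem.List.pyRange 0 ((xl.length : Int) - 1) 1

abbrev pvGrid (xl yl zl : List Int) : List PVCell := pvRx xl ×ˢ (pvRx yl ×ˢ pvRx zl)

theorem pv_B_side (ins : List PVInst) (xl yl zl : List Int) :
    (pvRx xl).foldl (fun tot i =>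
      (pvRx yl).foldl (fun tot j =>
        (pvRx zl).foldl (fun tot k =>
          if cellOnB ins (PySem.List.pyGetD xl i 0) (PySem.List.pyGetD yl j 0)
              (PySem.List.pyGetD zl k 0) then
            tot + (PySem.List.pyGetD xl (i + 1) 0 - PySem.List.pyGetD xl i 0) *
                  (PySem.List.pyGetD yl (j + 1) 0 - PySem.List.pyGetD yl j 0) *
                  (PySem.List.pyGetD zl (k + 1) 0 - PySem.List.pyGetD zl k 0)
          else tot) tot) tot) 0
    = ((pvGrid xl yl zl).map (pvF ins xl yl zl)).sum := by
  rw [show pvGrid xl yl zl = pvRx xl ×ˢ (pvRx yl ×ˢ pvRx zl) from rfl, pv_sum_prod3]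
  simp only [pv_foldl_if_add, PySem.List.foldl_add, zero_add]
  simp only [pvF, pvVol, getCubes]

set_option maxHeartbeats 2000000 in
theorem pv_main (ins : List (Bool × (Int × Int × Int × Int × Int × Int))) :
    part2 ins = part2_alt ins := by
  simp only [part2, part2_alt, pv_sets_split]
  rw [pv_axis_eq ins (fun c => c.1) (fun c => c.2.1),
    pv_axis_eq ins (fun c => c.2.2.1) (fun c => c.2.2.2.1),
    pv_axis_eq ins (fun c => c.2.2.2.2.1) (fun c => c.2.2.2.2.2)]
  set xl := axisB ins (fun c => c.1) (fun c => c.2.1) with hxl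
  set yl := axisB ins (fun c => c.2.2.1) (fun c => c.2.2.2.1) with hyl
  set zl := axisB ins (fun c => c.2.2.2.2.1) (fun c => c.2.2.2.2.2) with hzl
  rw [pv_B_side ins xl yl zl]
  have hx : xl.Pairwise (· < ·) := hxl ▸ pv_axisB_pairwise ins _ _
  have hy : yl.Pairwise (· < ·) := hyl ▸ pv_axisB_pairwise ins _ _
  have hz : zl.Pairwise (· < ·) := hzl ▸ pv_axisB_pairwise ins _ _
  have hm : ∀ t ∈ ins, PVMemsOK xl yl zl t := by
    intro t ht
    exact ⟨(pv_mem_axisB ins _ _ _).mpr ⟨t, ht, Or.inl rfl⟩,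
      (pv_mem_axisB ins _ _ _).mpr ⟨t, ht, Or.inr rfl⟩,
      (pv_mem_axisB ins _ _ _).mpr ⟨t, ht, Or.inl rfl⟩,
      (pv_mem_axisB ins _ _ _).mpr ⟨t, ht, Or.inr rfl⟩,
      (pv_mem_axisB ins _ _ _).mpr ⟨t, ht, Or.inl rfl⟩,
      (pv_mem_axisB ins _ _ _).mpr ⟨t, ht, Or.inr rfl⟩⟩
  have hTnd : (ins.foldl (stepA xl yl zl) PySem.Set.empty).Nodup :=
    pv_nodup_foldl_stepA xl yl zl ins _ List.nodup_nil
  have hTg : ∀ c ∈ ins.foldl (stepA xl yl zl) PySem.Set.empty, PVInGrid xl yl zl c :=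
    pv_grid_foldl_stepA xl yl zl ins hm _ (by intro c hc; simp [PySem.Set.empty] at hc)
  have hGmem : ∀ c : PVCell, c ∈ pvGrid xl yl zl ↔ PVInGrid xl yl zl c := by
    intro c
    rw [show (pvGrid xl yl zl) = pvRx xl ×ˢ (pvRx yl ×ˢ pvRx zl) from rfl,
      List.mem_product, List.mem_product]
    simp only [pvRx, PySem.List.mem_pyRange_one, PVInGrid]
    tauto
  have hGnd : (pvGrid xl yl zl).Nodup :=
    List.Nodup.product (PySem.List.nodup_pyRange_one _ _)
      (List.Nodup.product (PySem.List.nodup_pyRange_one _ _) (PySem.List.nodup_pyRange_one _ _))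
  have hperm : (ins.foldl (stepA xl yl zl) PySem.Set.empty).Perm
      ((pvGrid xl yl zl).filter
        (fun c => decide (c ∈ ins.foldl (stepA xl yl zl) PySem.Set.empty))) := by
    apply (List.perm_ext_iff_of_nodup hTnd (hGnd.filter _)).2
    intro c
    simp only [List.mem_filter, decide_eq_true_eq]
    constructor
    · intro hc
      exact ⟨(hGmem c).mpr (hTg c hc), hc⟩
    · exact fun h => h.2
  have hchar : ∀ c ∈ pvGrid xl yl zl,
      (decide (c ∈ ins.foldl (stepA xl yl zl) PySem.Set.empty) : Bool)
        = cellOnB ins (PySem.List.pyGetD xl c.1 0) (PySem.List.pyGetD yl c.2.1 0)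
            (PySem.List.pyGetD zl c.2.2 0) := by
    intro c hc
    have hg := (hGmem c).mp hc
    obtain ⟨i, j, k⟩ := c
    have hiff := pv_foldl_stepA_char xl yl zl hx hy hz ins hm i j k
      ⟨hg.1, hg.2.1⟩ ⟨hg.2.2.1, hg.2.2.2.1⟩ ⟨hg.2.2.2.2.1, hg.2.2.2.2.2⟩
      PySem.Set.empty false (by simp [PySem.Set.empty])
    rw [pv_cellOnB_eq]
    by_cases hT : (i, j, k) ∈ ins.foldl (stepA xl yl zl) PySem.Set.empty
    · exact (decide_eq_true hT).trans (hiff.mp hT).symm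
    · refine (decide_eq_false hT).trans ?_
      cases hbv : ins.foldl (pvStepB (PySem.List.pyGetD xl i 0) (PySem.List.pyGetD yl j 0)
          (PySem.List.pyGetD zl k 0)) false with
      | false => rfl
      | true => exact absurd (hiff.mpr hbv) hT
  rw [List.Perm.sum_eq (List.Perm.map _ hperm), ← pv_sum_map_ite_filter]
  refine congrArg List.sum (List.map_congr_left ?_)
  intro c hc
  rw [hchar c hc]

-- ===== VERDICT (by name: the statement is the Claim_ definition above) =====
theorem part2_spec : Claim_equal_part2 := by
  intro ins _
  show part2 ins = part2_alt ins
  exact pv_main ins
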